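-- pv_equiv track=rewrite | github.com/matts-og/adventofcode2019 | day08/space_image.py | get_layer_with_least_0
-- ===== SOURCE A (Python) =====
-- def count_n(raw_layer, n):
--     return len([p for p in raw_layer if p == n])
--
-- def get_layer_with_least_0(raw_layers):
--     least_0 = None
--     least_0_layer_idx = None
--     num_layers = len(raw_layers)
--     for idx in range(0,num_layers):
--         count0 = count_n(raw_layers[idx], '0')
--         if least_0 == None or count0 < least_0:
--             least_0 = count0
--             least_0_layer_idx = idx
--     return least_0_layer_idx
-- ===== SOURCE B (Python) =====
-- def get_layer_with_least_0(raw_layers):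
--     order = sorted(range(len(raw_layers)), key=lambda i: raw_layers[i].count('0'))
--     if order:
--         return order[0]
--     return None
-- ===== Notes on version B (the rewrite author's own statement) =====
-- stated objective: alternative
-- what changed: Replaces A's running-min loop over the layers with a stable sort of the layer indices keyed by zero-count, returning the head of the sorted order (stability makes the first minimal index come first).
import Mathlib
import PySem

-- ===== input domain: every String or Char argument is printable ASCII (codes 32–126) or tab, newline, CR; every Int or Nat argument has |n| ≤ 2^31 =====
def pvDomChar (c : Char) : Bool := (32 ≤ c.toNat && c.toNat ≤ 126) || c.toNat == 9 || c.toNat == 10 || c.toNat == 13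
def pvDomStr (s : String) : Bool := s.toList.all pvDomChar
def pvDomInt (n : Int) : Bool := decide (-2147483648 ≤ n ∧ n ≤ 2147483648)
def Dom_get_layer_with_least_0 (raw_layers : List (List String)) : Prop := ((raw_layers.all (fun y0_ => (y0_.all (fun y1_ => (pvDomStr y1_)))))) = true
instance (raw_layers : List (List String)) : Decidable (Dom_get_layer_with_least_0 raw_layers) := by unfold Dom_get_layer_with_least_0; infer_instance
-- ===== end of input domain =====

-- B replaces A's running-min loop by a stable sort of the indices keyed by zero-count, taking the head (objective: alternative).

-- ===== PORT A =====
def count_n (raw_layer : List String) (n : String) : Int :=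
  ((raw_layer.filter (fun p => p == n)).length : Int)

def get_layer_with_least_0 (raw_layers : List (List String)) : Option Int :=
  let num_layers : Int := (raw_layers.length : Int)
  let st := (PySem.List.pyRange 0 num_layers 1).foldl
    (fun (st : Option Int × Option Int) idx =>
      let count0 := count_n (PySem.List.pyGetD raw_layers idx []) "0"
      match st.1 with
      | none => (some count0, some idx)
      | some least => if count0 < least then (some count0, some idx) else st)
    (none, none)
  st.2

-- ===== PORT B =====
def get_layer_with_least_0_alt (raw_layers : List (List String)) : Option Int :=
  let order := PySem.List.sorted (PySem.List.pyRange 0 (raw_layers.length : Int) 1)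
    (fun i => (PySem.List.count (PySem.List.pyGetD raw_layers i []) "0" : Int)) false
  match order with
  | [] => none
  | i :: _ => some i

-- ===== PRECONDITION & SPEC =====
def Spec_get_layer_with_least_0 (raw_layers : List (List String)) (out : Option Int) : Prop := out = get_layer_with_least_0_alt raw_layers
instance (raw_layers : List (List String)) (out : Option Int) : Decidable (Spec_get_layer_with_least_0 raw_layers out) := by unfold Spec_get_layer_with_least_0; infer_instance

-- ===== CLAIM (what is proved, stated in full; the proofs are below) =====
def Claim_equal_get_layer_with_least_0 : Prop := ∀ (raw_layers : List (List String)), Dom_get_layer_with_least_0 raw_layers → Spec_get_layer_with_least_0 raw_layers (get_layer_with_least_0 raw_layers)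

-- ===== LEMMAS AND PROOFS =====

-- running first-argmin under a key
def pvBest (key : Int → Int) (l : List Int) (h : Int) : Int :=
  l.foldl (fun h x => if key x < key h then x else h) h

-- the head of the insertion-sort fold is the running strict-min (first occurrence wins)
theorem pv_head_foldl_insertBy (key : Int → Int) (l : List Int) :
    ∀ (y : Int) (ys : List Int), ∃ ts,
      l.foldl (fun acc x => PySem.List.insertBy (fun a b => decide (key a < key b)) x acc) (y :: ys)
        = pvBest key l y :: ts := by
  induction l with
  | nil => intro y ys; exact ⟨ys, rfl⟩
  | cons x t ih =>
      intro y ys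
      simp only [List.foldl_cons, pvBest, PySem.List.insertBy]
      by_cases hx : key x < key y
      · simp only [hx, decide_true, if_pos]
        exact ih x (y :: ys)
      · simp only [hx, decide_false, reduceIte]
        exact ih y (PySem.List.insertBy (fun a b => decide (key a < key b)) x ys)

-- A's loop, once initialised, tracks (key of best, best)
theorem pv_a_fold (key : Int → Int) (l : List Int) :
    ∀ (h : Int),
      l.foldl
        (fun (st : Option Int × Option Int) idx =>
          match st.1 with
          | none => (some (key idx), some idx)
          | some least => if key idx < least then (some (key idx), some idx) else st)
        (some (key h), some h)
      = (some (key (pvBest key l h)), some (pvBest key l h)) := by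
  induction l with
  | nil => intro h; rfl
  | cons x t ih =>
      intro h
      simp only [List.foldl_cons, pvBest]
      by_cases hx : key x < key h
      · simp only [hx, if_pos]; exact ih x
      · simp only [hx, reduceIte]; exact ih h

-- count_n is Python's list.count
theorem pv_count_n_eq (l : List String) : count_n l "0" = (PySem.List.count l "0" : Int) := by
  simp [count_n, PySem.List.count_eq, List.count_eq_countP, List.countP_eq_length_filter]

-- ===== VERDICT (by name: the statement is the Claim_ definition above) =====
theorem get_layer_with_least_0_spec : Claim_equal_get_layer_with_least_0 := by
  intro raw_layers _
  unfold Spec_get_layer_with_least_0 get_layer_with_least_0 get_layer_with_least_0_alt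
  dsimp only
  set key : Int → Int := fun i => (PySem.List.count (PySem.List.pyGetD raw_layers i []) "0" : Int) with hkey
  have hk : ∀ i, count_n (PySem.List.pyGetD raw_layers i []) "0" = key i := by
    intro i; rw [hkey]; exact pv_count_n_eq _
  cases raw_layers with
  | nil => rfl
  | cons x t =>
      have hpos : (0 : Int) < ((x :: t).length : Int) := by
        simp only [List.length_cons]; omega
      rw [PySem.List.sorted_eq_foldl_insertBy, PySem.List.pyRange_one_cons hpos]
      simp only [List.foldl_cons]
      -- B side: insert 0 into [] then fold; head is the running argmin
      have hB := pv_head_foldl_insertBy key (PySem.List.pyRange (0 + 1) ((x :: t).length : Int) 1) 0 []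
      obtain ⟨ts, hts⟩ := hB
      -- A side: first step initialises the state at index 0
      simp only [hk]
      rw [pv_a_fold key]
      rw [show PySem.List.insertBy (fun a b => decide (key a < key b)) 0 [] = [0] from rfl]
      rw [hts]
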